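-- pv_equiv track=rewrite | github.com/VoyagerToko/Github-analyser | demo.py | limit_total_text
-- ===== SOURCE A (Python) =====
-- from typing import List, Iterable, Tuple, Optional
--
-- def limit_total_text(pages: List[Tuple[str, str]], cap: int) -> List[Tuple[str, str]]:
--     """Cap the combined character count across pages to RESULT_CHAR_LIMIT."""
--     total = 0
--     kept: List[Tuple[str, str]] = []
--     for url, text in pages:
--         if total >= cap:
--             break
--         room = cap - total
--         kept_text = text[:room]
--         kept.append((url, kept_text))
--         total += len(kept_text)
--     return kept
-- ===== SOURCE B (Python) =====
-- def limit_total_text(pages, cap):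
--     """Cap the combined character count across pages: prefix sums + count, then slice."""
--     if cap <= 0:
--         return []
--     prefixes = []
--     s = 0
--     for _, text in pages:
--         s += len(text)
--         prefixes.append(s)
--     j = sum(1 for p in prefixes if p < cap)
--     if j == len(pages):
--         return list(pages)
--     prev = prefixes[j - 1] if j > 0 else 0
--     url, text = pages[j]
--     return pages[:j] + [(url, text[:cap - prev])]
-- ===== Notes on version B (the rewrite author's own statement) =====
-- stated objective: alternative
-- what changed: A accumulates a running total and truncates/appends page by page with an early break; B computes the prefix sums of page lengths, counts how many prefixes stay below the cap to locate the cut page, and builds the result as an unchanged slice plus one truncated page.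
import Mathlib
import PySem

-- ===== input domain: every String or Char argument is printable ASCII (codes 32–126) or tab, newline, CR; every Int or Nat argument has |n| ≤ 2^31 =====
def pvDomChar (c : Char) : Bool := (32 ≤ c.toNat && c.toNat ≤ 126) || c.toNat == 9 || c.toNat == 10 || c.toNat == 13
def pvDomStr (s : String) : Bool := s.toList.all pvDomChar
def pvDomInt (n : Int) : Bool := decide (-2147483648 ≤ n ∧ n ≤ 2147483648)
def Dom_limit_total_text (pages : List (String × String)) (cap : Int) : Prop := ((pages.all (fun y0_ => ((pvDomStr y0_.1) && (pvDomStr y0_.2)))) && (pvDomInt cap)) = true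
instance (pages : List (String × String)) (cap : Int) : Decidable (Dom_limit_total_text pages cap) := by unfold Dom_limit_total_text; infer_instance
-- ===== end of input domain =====

-- B replaces A's running-total loop with prefix sums, a count of prefixes below the cap, and one slice; objective: alternative decomposition (same return value; no speed claim).

-- ===== PORT A =====
-- the 'for url, text in pages' loop with its break, running total and kept.append
def limitLoopA : List (String × String) → Int → Int → List (String × String) → List (String × String)
  | [], _, _, kept => kept
  | (url, text) :: rest, cap, total, kept =>
    if total ≥ cap then kept
    else
      let kept_text := PySem.Str.slice text none (some (cap - total))
      limitLoopA rest cap (total + PySem.Str.len kept_text) (kept ++ [(url, kept_text)])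

def limit_total_text (pages : List (String × String)) (cap : Int) : List (String × String) :=
  limitLoopA pages cap 0 []

-- ===== PORT B =====
-- the prefix-sum loop of Source B ('s += len(text); prefixes.append(s)')
def pvPrefixes : List (String × String) → Int → List Int
  | [], _ => []
  | (_, text) :: rest, s =>
    let s' := s + PySem.Str.len text
    s' :: pvPrefixes rest s'

def limit_total_text_alt (pages : List (String × String)) (cap : Int) : List (String × String) :=
  if cap ≤ 0 then []
  else
    let prefixes := pvPrefixes pages 0
    let j : Int := prefixes.foldl (fun acc p => if p < cap then acc + 1 else acc) 0
    if j = (pages.length : Int) then pages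
    else
      let prev : Int := if 0 < j then (PySem.List.pyGet? prefixes (j - 1)).getD 0 else 0
      match PySem.List.pyGet? pages j with
      | some (url, text) =>
          PySem.List.slice pages none (some j) ++ [(url, PySem.Str.slice text none (some (cap - prev)))]
      | none => []  -- unreachable in Source B: there j < len(pages)

-- ===== PRECONDITION & SPEC =====
def Spec_limit_total_text (pages : List (String × String)) (cap : Int) (out : List (String × String)) : Prop := out = limit_total_text_alt pages cap
instance (pages : List (String × String)) (cap : Int) (out : List (String × String)) : Decidable (Spec_limit_total_text pages cap out) := by unfold Spec_limit_total_text; infer_instance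

-- ===== CLAIM (what is proved, stated in full; the proofs are below) =====
def Claim_equal_limit_total_text : Prop := ∀ (pages : List (String × String)) (cap : Int), Dom_limit_total_text pages cap → Spec_limit_total_text pages cap (limit_total_text pages cap)

-- ===== LEMMAS AND PROOFS =====

-- common characterization of both programs
def pvSpecFn : List (String × String) → Int → List (String × String)
  | [], _ => []
  | (u, t) :: rest, cap =>
    if cap ≤ 0 then []
    else (u, PySem.Str.slice t none (some cap)) :: pvSpecFn rest (cap - min cap (PySem.Str.len t))

theorem pvSpecFn_nonpos (xs : List (String × String)) (c : Int) (h : c ≤ 0) : pvSpecFn xs c = [] := by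
  cases xs with
  | nil => rfl
  | cons p rest => cases p; simp [pvSpecFn, h]

theorem pvLenSliceTo (t : String) (b : Int) (hb : 0 ≤ b) :
    PySem.Str.len (PySem.Str.slice t none (some b)) = min b (PySem.Str.len t) := by
  simp [PySem.Str.len_eq, PySem.Str.toList_slice, PySem.List.slice_to _ hb]
  omega

theorem pvSliceToAll (t : String) (b : Int) (h0 : 0 ≤ b) (h : PySem.Str.len t ≤ b) :
    PySem.Str.slice t none (some b) = t := by
  apply String.toList_inj.mp
  simp [PySem.Str.toList_slice, PySem.List.slice_to _ h0]
  simp [PySem.Str.len_eq] at h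
  omega

theorem limitLoopA_eq (rest : List (String × String)) (cap total : Int)
    (kept : List (String × String)) :
    limitLoopA rest cap total kept = kept ++ pvSpecFn rest (cap - total) := by
  induction rest generalizing total kept with
  | nil => simp [limitLoopA, pvSpecFn]
  | cons p rest ih =>
    obtain ⟨u, t⟩ := p
    simp only [limitLoopA]
    by_cases h : total ≥ cap
    · rw [if_pos h, pvSpecFn_nonpos _ _ (by omega)]
      simp
    · rw [if_neg h, ih]
      simp only [pvSpecFn]
      rw [if_neg (by omega), pvLenSliceTo t _ (by omega)]
      have harg : cap - (total + min (cap - total) (PySem.Str.len t))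
          = cap - total - min (cap - total) (PySem.Str.len t) := by omega
      rw [harg]
      simp

theorem pvPrefixes_shift (xs : List (String × String)) (s : Int) :
    pvPrefixes xs s = (pvPrefixes xs 0).map (fun q => s + q) := by
  induction xs generalizing s with
  | nil => simp [pvPrefixes]
  | cons p rest ih =>
    obtain ⟨u, t⟩ := p
    simp only [pvPrefixes, List.map_cons, zero_add, List.cons.injEq]
    refine ⟨trivial, ?_⟩
    rw [ih (s + PySem.Str.len t), ih (PySem.Str.len t), List.map_map]
    apply List.map_congr_left
    intro q _
    simp
    ring

theorem pvStrLen_nonneg (t : String) : 0 ≤ PySem.Str.len t := by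
  simp [PySem.Str.len_eq]

theorem pvPrefixes_nonneg (xs : List (String × String)) :
    ∀ q ∈ pvPrefixes xs 0, 0 ≤ q := by
  induction xs with
  | nil => simp [pvPrefixes]
  | cons p rest ih =>
    obtain ⟨u, t⟩ := p
    simp only [pvPrefixes, zero_add, List.mem_cons]
    rintro q (rfl | hq)
    · exact pvStrLen_nonneg t
    · rw [pvPrefixes_shift] at hq
      obtain ⟨q0, hq0, rfl⟩ := List.mem_map.mp hq
      have := ih q0 hq0
      have := pvStrLen_nonneg t
      omega

theorem pvPrefixes_length (xs : List (String × String)) (s : Int) :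
    (pvPrefixes xs s).length = xs.length := by
  induction xs generalizing s with
  | nil => rfl
  | cons p rest ih => obtain ⟨u, t⟩ := p; simp [pvPrefixes, ih]

theorem alt_eq_spec (pages : List (String × String)) (cap : Int) :
    limit_total_text_alt pages cap = pvSpecFn pages cap := by
  induction pages generalizing cap with
  | nil => by_cases hc : cap ≤ 0 <;> simp [limit_total_text_alt, pvSpecFn, pvPrefixes, hc]
  | cons p rest ih =>
    obtain ⟨u, t⟩ := p
    by_cases hc : cap ≤ 0
    · simp [limit_total_text_alt, pvSpecFn, hc]
    · have hc' : 0 < cap := by omega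
      have hL : 0 ≤ PySem.Str.len t := pvStrLen_nonneg t
      simp only [limit_total_text_alt, if_neg hc, pvPrefixes, zero_add, List.foldl_cons]
      rw [PySem.List.foldl_ite_add_one (fun p => p < cap)]
      rw [pvPrefixes_shift rest (PySem.Str.len t), List.countP_map]
      have hcg : ((fun x => decide (x < cap)) ∘ fun q => PySem.Str.len t + q)
          = fun q => decide (q < cap - PySem.Str.len t) := by
        funext q
        simp [decide_eq_decide]
        omega
      rw [hcg]
      by_cases hLc : PySem.Str.len t < cap
      · -- page fits below the cap entirely
        simp only [if_pos hLc]
        have hnle : (pvPrefixes rest 0).countP (fun q => decide (q < cap - PySem.Str.len t)) ≤ rest.length := by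
          have h1 := List.countP_le_length (p := fun q => decide (q < cap - PySem.Str.len t)) (l := pvPrefixes rest 0)
          rw [pvPrefixes_length] at h1
          exact h1
        simp only [pvSpecFn, if_neg hc]
        rw [pvSliceToAll t cap (by omega) (by omega)]
        rw [min_eq_right (by omega)]
        rw [← ih (cap - PySem.Str.len t)]
        simp only [limit_total_text_alt, if_neg (show ¬(cap - PySem.Str.len t ≤ 0) by omega)]
        rw [PySem.List.foldl_ite_add_one (fun p => p < cap - PySem.Str.len t)]
        simp only [zero_add]
        obtain ⟨n, hn⟩ : ∃ k, (pvPrefixes rest 0).countP (fun q => decide (q < cap - PySem.Str.len t)) = k :=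
          ⟨_, rfl⟩
        rw [hn] at hnle ⊢
        by_cases hfull : n = rest.length
        · rw [if_pos (by simp [hfull]; omega), if_pos (by simp [hfull])]
        · have hlt : n < rest.length := by omega
          rw [if_neg (show ¬((1 : Int) + (n : Int) = ↑(((u, t) :: rest).length)) by simp; omega)]
          rw [if_neg (show ¬((n : Int) = (rest.length : Int)) by omega)]
          have hcast : (1 : Int) + (n : Int) = ((n + 1 : Nat) : Int) := by push_cast; ring
          rw [hcast]
          obtain ⟨u', t', hp⟩ : ∃ u' t', rest[n]? = some (u', t') := by
            exact ⟨rest[n].1, rest[n].2, by simp [List.getElem?_eq_getElem hlt]⟩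
          rw [PySem.List.pyGet?_natCast, List.getElem?_cons_succ, hp]
          rw [PySem.List.pyGet?_natCast, hp]
          rw [PySem.List.slice_to_natCast, List.take_succ_cons]
          rw [PySem.List.slice_to_natCast]
          have hP0len : (pvPrefixes rest 0).length = rest.length := pvPrefixes_length rest 0
          have hprev :
              (cap - if 0 < ((n + 1 : Nat) : Int) then
                  (PySem.List.pyGet?
                    (PySem.Str.len t :: List.map (fun q => PySem.Str.len t + q) (pvPrefixes rest 0))
                    (((n + 1 : Nat) : Int) - 1)).getD 0
                else 0)
              = (cap - PySem.Str.len t -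
                  if 0 < (n : Int) then (PySem.List.pyGet? (pvPrefixes rest 0) ((n : Int) - 1)).getD 0
                  else 0) := by
            rw [if_pos (by positivity)]
            have h1 : ((n + 1 : Nat) : Int) - 1 = (n : Int) := by push_cast; ring
            rw [h1, PySem.List.pyGet?_natCast]
            cases n with
            | zero => simp
            | succ m =>
              have hm : m < (pvPrefixes rest 0).length := by rw [hP0len]; omega
              have h2 : ((m + 1 : Nat) : Int) - 1 = (m : Int) := by push_cast; ring
              rw [h2, PySem.List.pyGet?_natCast]
              simp [List.getElem?_eq_getElem hm, List.getElem?_map]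
              omega
          rw [hprev]
          simp
      · -- cap ≤ len t : only a truncated first page survives
        have hlen : PySem.Str.len t = (t.length : Int) := by simp [PySem.Str.len_eq]
        have hzero : (pvPrefixes rest 0).countP (fun q => decide (q < cap - PySem.Str.len t)) = 0 := by
          apply List.countP_eq_zero.mpr
          intro q hq
          have := pvPrefixes_nonneg rest q hq
          simp
          omega
        rw [hzero]
        simp only [if_neg hLc, Nat.cast_zero, add_zero]
        rw [if_neg (by simp; omega)]
        rw [PySem.List.pyGet?_zero_cons]
        rw [PySem.List.slice_to _ (le_refl (0 : Int))]
        simp only [pvSpecFn, if_neg hc]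
        rw [min_eq_left (by omega)]
        rw [pvSpecFn_nonpos rest _ (by omega)]
        simp
-- ===== VERDICT (by name: the statement is the Claim_ definition above) =====
theorem limit_total_text_spec : Claim_equal_limit_total_text := by
  intro pages cap _
  show limit_total_text pages cap = limit_total_text_alt pages cap
  rw [limit_total_text, limitLoopA_eq, alt_eq_spec]
  simp
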